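-- pv_equiv track=rewrite | github.com/Davte/davtelepot | datelepot/utilities.py | case_accent_insensitive_sql
-- ===== SOURCE A (Python) =====
-- def case_accent_insensitive_sql(field):
--     """Given a field, return a part of SQL string necessary to perform a case- and accent-insensitive query."""
--     replacements = [
--         (' ', ''),
--         ('à', 'a'),
--         ('è', 'e'),
--         ('é', 'e'),
--         ('ì', 'i'),
--         ('ò', 'o'),
--         ('ù', 'u'),
--     ]
--     return "{r}LOWER({f}){w}".format(
--         r="replace(".upper()*len(replacements),
--         f=field,
--         w=''.join(
--             ", '{w[0]}', '{w[1]}')".format(w=w)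
--             for w in replacements
--         )
--     )
-- ===== SOURCE B (Python) =====
-- def case_accent_insensitive_sql(field):
--     """Given a field, return a part of SQL string necessary to perform a case- and accent-insensitive query."""
--     replacements = [
--         (' ', ''),
--         ('à', 'a'),
--         ('è', 'e'),
--         ('é', 'e'),
--         ('ì', 'i'),
--         ('ò', 'o'),
--         ('ù', 'u'),
--     ]
--     expr = "LOWER({})".format(field)
--     for a, b in replacements:
--         expr = "REPLACE({}, '{}', '{}')".format(expr, a, b)
--     return expr
-- ===== Notes on version B (the rewrite author's own statement) =====
-- stated objective: simpler
-- what changed: Replaced the three-part assembly (a repeated prefix built by string multiplication, the lowered field, and a joined suffix of closing fragments) with a single left fold that wraps the expression once per replacement pair.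
import Mathlib
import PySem

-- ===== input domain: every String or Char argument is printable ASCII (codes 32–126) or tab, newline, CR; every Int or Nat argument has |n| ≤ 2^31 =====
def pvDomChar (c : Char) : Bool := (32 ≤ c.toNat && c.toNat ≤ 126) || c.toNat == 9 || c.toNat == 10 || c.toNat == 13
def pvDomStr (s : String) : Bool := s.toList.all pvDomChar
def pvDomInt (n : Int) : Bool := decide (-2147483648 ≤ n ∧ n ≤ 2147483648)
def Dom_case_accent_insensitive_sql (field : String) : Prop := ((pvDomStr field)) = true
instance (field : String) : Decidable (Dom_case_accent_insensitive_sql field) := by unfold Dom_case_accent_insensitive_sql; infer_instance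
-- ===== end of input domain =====

-- B builds the nested REPLACE expression by a single left fold instead of A's
-- prefix-multiplication + joined-suffix assembly (objective: simpler).

-- ===== PORT A =====
def pvReplacements : List (String × String) :=
  [(" ", ""), ("à", "a"), ("è", "e"), ("é", "e"), ("ì", "i"), ("ò", "o"), ("ù", "u")]

-- "replace(".upper() * len(replacements)
def pvRepeatStr (s : String) : Nat → String
  | 0 => ""
  | n + 1 => s ++ pvRepeatStr s n

def case_accent_insensitive_sql (field : String) : String :=
  (pvRepeatStr (PySem.Str.upper "replace(") pvReplacements.length)
    ++ "LOWER(" ++ field ++ ")"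
    ++ PySem.Str.join "" (pvReplacements.map (fun w => ", '" ++ w.1 ++ "', '" ++ w.2 ++ "')"))

-- ===== PORT B =====
def case_accent_insensitive_sql_alt (field : String) : String :=
  pvReplacements.foldl
    (fun expr w => "REPLACE(" ++ expr ++ ", '" ++ w.1 ++ "', '" ++ w.2 ++ "')")
    ("LOWER(" ++ field ++ ")")

-- ===== PRECONDITION & SPEC =====
def Spec_case_accent_insensitive_sql (field : String) (out : String) : Prop := out = case_accent_insensitive_sql_alt field
instance (field : String) (out : String) : Decidable (Spec_case_accent_insensitive_sql field out) := by unfold Spec_case_accent_insensitive_sql; infer_instance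

-- ===== CLAIM (what is proved, stated in full; the proofs are below) =====
def Claim_equal_case_accent_insensitive_sql : Prop := ∀ (field : String), Dom_case_accent_insensitive_sql field → Spec_case_accent_insensitive_sql field (case_accent_insensitive_sql field)

-- ===== LEMMAS AND PROOFS =====

-- ===== VERDICT (by name: the statement is the Claim_ definition above) =====
theorem case_accent_insensitive_sql_spec : Claim_equal_case_accent_insensitive_sql := by
  intro field _
  unfold Spec_case_accent_insensitive_sql case_accent_insensitive_sql case_accent_insensitive_sql_alt
  apply String.toList_inj.mp
  simp [pvReplacements, pvRepeatStr, PySem.Str.join, PySem.Str.upper, List.foldl,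
    String.toList_append, PySem.Chars.upper, PySem.Chars.join, PySem.Chars.upperChar]
  decide
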